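-- pv_equiv track=rewrite | github.com/Hallen1108/Verbal-Mastermind | a06q3.py | number_other
-- ===== SOURCE A (Python) =====
-- def updated_str(keyword, message):
--     string = ""
--     for x in range(0,len(keyword)):
--         if keyword[x] != message[x]:
--             string = string + keyword[x]
--         else:
--             string = string
--     return string
--
-- def number_other(keyword,message):
--     message_str = updated_str(message,keyword)
--     keyword_str = updated_str(keyword,message)
--     num_other = 0
--     for x in message_str:
--         num_other = num_other + min(message_str.count(x), keyword_str.count(x))
--         message_str = message_str.replace(x,"")
--         keyword_str = keyword_str.replace(x,"")
--     return num_other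
-- ===== SOURCE B (Python) =====
-- def number_other(keyword, message):
--     # one pass per string building mismatched-char count dicts, then one pass
--     # summing the minimum of the two counts per distinct mismatched char
--     cm = {}
--     for i in range(len(message)):
--         m = message[i]
--         if m != keyword[i]:
--             cm[m] = cm.get(m, 0) + 1
--     ck = {}
--     for i in range(len(keyword)):
--         k = keyword[i]
--         if k != message[i]:
--             ck[k] = ck.get(k, 0) + 1
--     return sum(min(c, ck.get(ch, 0)) for ch, c in cm.items())
-- ===== Notes on version B (the rewrite author's own statement) =====
-- stated objective: faster
-- what changed: A rescans the mismatch strings with count() and replace() for every character; B builds a count dict per string in one indexed pass and sums the per-character minimum of the two counts.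
import Mathlib
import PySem

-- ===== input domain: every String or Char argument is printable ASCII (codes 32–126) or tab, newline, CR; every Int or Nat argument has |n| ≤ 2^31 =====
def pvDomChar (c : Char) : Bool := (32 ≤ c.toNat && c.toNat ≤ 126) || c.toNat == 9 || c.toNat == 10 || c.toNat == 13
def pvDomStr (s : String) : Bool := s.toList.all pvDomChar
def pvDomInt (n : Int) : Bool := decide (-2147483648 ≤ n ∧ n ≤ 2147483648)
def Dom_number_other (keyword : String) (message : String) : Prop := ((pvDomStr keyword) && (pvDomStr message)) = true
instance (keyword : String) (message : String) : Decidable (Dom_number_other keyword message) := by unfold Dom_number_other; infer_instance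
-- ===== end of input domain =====

-- B replaces A's repeated count()/replace() rescans by count dicts built in one pass each plus one min-summing pass.

-- ===== PORT A =====
-- Strings are ported through toList; str.replace(x, "") for a single char x is List.filter (· ≠ x)
-- (exact for a one-char pattern and empty replacement); str.count(x) for a single char is List.count.
-- The `| _, _ => string` arm of the match is Python's IndexError (pyGet? = none), excluded by Pre_.
def pvUpdatedStr (keyword message : List Char) : List Char :=
  (PySem.List.pyRange 0 (keyword.length : Int) 1).foldl
    (fun string x =>
      match PySem.List.pyGet? keyword x, PySem.List.pyGet? message x with
      | some kc, some mc => if kc ≠ mc then string ++ [kc] else string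
      | _, _ => string)
    []

def number_other (keyword : String) (message : String) : Int :=
  let message_str := pvUpdatedStr message.toList keyword.toList
  let keyword_str := pvUpdatedStr keyword.toList message.toList
  (message_str.foldl
    (fun st x =>
      (st.1 + min ((st.2.1.count x : Nat) : Int) ((st.2.2.count x : Nat) : Int),
       st.2.1.filter (fun c => c ≠ x),
       st.2.2.filter (fun c => c ≠ x)))
    ((0 : Int), message_str, keyword_str)).1

-- ===== PORT B =====
-- Source B's 'for i in range(len(u)): if u[i] != v[i]: d[u[i]] = d.get(u[i], 0) + 1' counting loop;
-- the `| _, _ => d` arm is Python's IndexError (pyGet? = none), excluded by Pre_.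
def pvCountMismatch (u v : List Char) : PySem.Dict Char Int :=
  (PySem.List.pyRange 0 (u.length : Int) 1).foldl
    (fun d i =>
      match PySem.List.pyGet? u i, PySem.List.pyGet? v i with
      | some a, some b => if a ≠ b then d.insert a (d.getD a 0 + 1) else d
      | _, _ => d)
    PySem.Dict.empty

def number_other_alt (keyword : String) (message : String) : Int :=
  let cm := pvCountMismatch message.toList keyword.toList
  let ck := pvCountMismatch keyword.toList message.toList
  (cm.items.map (fun p => min p.2 (ck.getD p.1 0))).sum

-- ===== PRECONDITION & SPEC =====
-- Pre_ excludes unequal lengths, on which Python A raises IndexError (updated_str indexes the shorter string).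
def Pre_number_other (keyword : String) (message : String) : Prop :=
  keyword.toList.length = message.toList.length
instance (keyword : String) (message : String) : Decidable (Pre_number_other keyword message) := by
  unfold Pre_number_other; infer_instance
def pvWitness_number_other : String × String := ("ab", "bb")

def Spec_number_other (keyword : String) (message : String) (out : Int) : Prop :=
  out = number_other_alt keyword message
instance (keyword : String) (message : String) (out : Int) : Decidable (Spec_number_other keyword message out) := by
  unfold Spec_number_other; infer_instance

-- ===== CLAIM (what is proved, stated in full; the proofs are below) =====
def Claim_equal_number_other : Prop := ∀ (keyword : String) (message : String), Dom_number_other keyword message → Pre_number_other keyword message → Spec_number_other keyword message (number_other keyword message)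

-- ===== LEMMAS AND PROOFS =====

-- indexing steps of the two ports' index loops
theorem pv_pyGet?_zero {α : Type} (x : α) (xs : List α) : PySem.List.pyGet? (x :: xs) 0 = some x := by
  simp [PySem.List.pyGet?, PySem.List.pyIdx?]

theorem pv_pyGet?_succ {α : Type} (x : α) (xs : List α) (k : Nat) :
    PySem.List.pyGet? (x :: xs) ((k : Int) + 1) = PySem.List.pyGet? xs (k : Int) := by
  simp only [PySem.List.pyGet?, PySem.List.pyIdx?]
  split_ifs with h1 h2 h3 h4 h5 <;> simp_all <;> try omega

-- any 'for i in range(len(u)): if u[i] != v[i]: <step on u[i]>' loop (equal lengths)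
-- is a fold of its step over the list of mismatched-position chars of u
theorem pv_index_fold {σ : Type} (step : σ → Char → σ) (u : List Char) :
    ∀ (v : List Char) (init : σ), u.length = v.length →
    (PySem.List.pyRange 0 (u.length : Int) 1).foldl
      (fun acc i =>
        match PySem.List.pyGet? u i, PySem.List.pyGet? v i with
        | some a, some b => if a ≠ b then step acc a else acc
        | _, _ => acc) init
    = (((u.zip v).filter (fun q => decide (q.1 ≠ q.2))).map Prod.fst).foldl step init := by
  induction u with
  | nil => intro v init h; simp [PySem.List.pyRange_one_eq_nil]
  | cons c u' ih =>
    intro v init h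
    cases v with
    | nil => simp at h
    | cons d v' =>
      simp only [List.length_cons] at h ⊢
      rw [PySem.List.pyRange_one_cons (by push_cast; omega)]
      have hshift : PySem.List.pyRange (0+1) ((u'.length + 1 : Nat) : Int) 1
          = (PySem.List.pyRange 0 ((u'.length : Nat) : Int) 1).map (· + 1) := by
        rw [PySem.List.pyRange_one, PySem.List.pyRange_one]
        have h2 : ((u'.length + 1 : Nat) - (0 + 1) : Int).toNat = ((u'.length : Nat) - 0 : Int).toNat := by
          push_cast; omega
        rw [h2, List.map_map]
        apply List.map_congr_left
        intro k hk
        simp only [Function.comp_apply]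
        ring
      simp only [List.foldl_cons, pv_pyGet?_zero]
      rw [hshift, List.foldl_map]
      have step2 := PySem.List.foldl_congr_mem
        (l := PySem.List.pyRange 0 ((u'.length : Nat) : Int) 1)
        (init := if c ≠ d then step init c else init)
        (f := fun acc y =>
          match PySem.List.pyGet? (c :: u') (y + 1), PySem.List.pyGet? (d :: v') (y + 1) with
          | some a, some b => if a ≠ b then step acc a else acc
          | _, _ => acc)
        (g := fun acc i =>
          match PySem.List.pyGet? u' i, PySem.List.pyGet? v' i with
          | some a, some b => if a ≠ b then step acc a else acc
          | _, _ => acc)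
        (by
          intro s x hx
          rw [PySem.List.mem_pyRange_one] at hx
          obtain ⟨k, rfl⟩ : ∃ k : Nat, x = (k : Int) := ⟨x.toNat, by omega⟩
          simp only [pv_pyGet?_succ])
      rw [step2, ih v' _ (by omega)]
      by_cases hcd : c = d <;> simp [hcd]

-- A's updated_str is the mismatch list itself
theorem pvUpdatedStr_eq (u v : List Char) (h : u.length = v.length) :
    pvUpdatedStr u v = ((u.zip v).filter (fun q => decide (q.1 ≠ q.2))).map Prod.fst := by
  refine Eq.trans (pv_index_fold (fun s a => s ++ [a]) u v [] h) ?_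
  rw [PySem.List.foldl_append_singleton]
  simp

-- B's counting loop is the Counter of the mismatch list
theorem pvCountMismatch_eq (u v : List Char) (h : u.length = v.length) :
    pvCountMismatch u v
      = PySem.Dict.counter (((u.zip v).filter (fun q => decide (q.1 ≠ q.2))).map Prod.fst) := by
  refine Eq.trans (pv_index_fold (σ := PySem.Dict Char Int) (fun d a => d.insert a (d.getD a 0 + 1)) u v PySem.Dict.empty h) ?_
  exact PySem.Dict.foldl_insert_getD_add_one_eq_counter _

-- the multiset intersection shrinks by min-count when one value is removed from both sides
theorem pv_inter_step (x : Char) (m k : List Char) :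
    (↑m ∩ ↑k : Multiset Char)
      = Multiset.replicate (min (m.count x) (k.count x)) x
        + (↑(m.filter (fun c => decide (c ≠ x))) ∩ ↑(k.filter (fun c => decide (c ≠ x)))) := by
  ext y
  rw [Multiset.count_inter, Multiset.count_add, Multiset.count_replicate, Multiset.count_inter]
  rw [← Multiset.filter_coe (fun c => c ≠ x), ← Multiset.filter_coe (fun c => c ≠ x)]
  rw [Multiset.count_filter, Multiset.count_filter]
  by_cases hyx : y = x
  · subst hyx; simp [Multiset.coe_count]
  · simp [hyx, Multiset.coe_count]
    exact fun h => absurd h.symm hyx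

-- A's counting loop computes the multiset-intersection cardinality
theorem pv_loopA (xs : List Char) : ∀ (m k : List Char) (acc : Int), (∀ y ∈ m, y ∈ xs) →
    (xs.foldl
      (fun st x =>
        (st.1 + min ((st.2.1.count x : Nat) : Int) ((st.2.2.count x : Nat) : Int),
         st.2.1.filter (fun c => c ≠ x),
         st.2.2.filter (fun c => c ≠ x)))
      (acc, m, k)).1 = acc + ((↑m ∩ ↑k : Multiset Char).card : Int) := by
  induction xs with
  | nil =>
    intro m k acc hm
    have : m = [] := by
      cases m with
      | nil => rfl
      | cons a t => exact absurd (hm a (by simp)) (by simp)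
    subst this
    simp
  | cons x xs ih =>
    intro m k acc hm
    simp only [List.foldl_cons]
    rw [ih _ _ _ (fun y hy => by
      have := List.mem_filter.mp hy
      have h1 := hm y this.1
      have h2 : y ≠ x := by simpa using this.2
      simp at h1
      tauto)]
    rw [pv_inter_step x m k]
    simp [Nat.cast_min]
    ring

-- count is unchanged by filtering out a different char
theorem pv_count_filter_ne (m : List Char) (x y : Char) (h : y ≠ x) :
    (m.filter (fun c => decide (c ≠ x))).count y = m.count y := by
  rw [List.count_filter]
  simp [h]

-- summing min-counts over the distinct elements of m is the multiset-intersection cardinality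
theorem pv_sum_min (d : List Char) : ∀ (m k : List Char), d.Nodup → (∀ y, y ∈ d ↔ y ∈ m) →
    (d.map (fun ch => min ((m.count ch : Nat) : Int) ((k.count ch : Nat) : Int))).sum
      = ((↑m ∩ ↑k : Multiset Char).card : Int) := by
  induction d with
  | nil =>
    intro m k _ hmem
    have : m = [] := by
      cases m with
      | nil => rfl
      | cons a t => exact absurd ((hmem a).mpr (by simp)) (by simp)
    subst this
    simp
  | cons ch d' ih =>
    intro m k hnd hmem
    have hch : ch ∉ d' := (List.nodup_cons.mp hnd).1
    have hcard : ((↑m ∩ ↑k : Multiset Char)).card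
        = min (m.count ch) (k.count ch)
          + ((↑(m.filter (fun c => decide (c ≠ ch))) ∩ ↑(k.filter (fun c => decide (c ≠ ch))) : Multiset Char)).card := by
      rw [pv_inter_step ch m k]
      simp
    have hmem' : ∀ y, y ∈ d' ↔ y ∈ m.filter (fun c => decide (c ≠ ch)) := by
      intro y
      rw [List.mem_filter]
      constructor
      · intro hy
        have hyne : y ≠ ch := fun he => hch (he ▸ hy)
        exact ⟨(hmem y).mp (List.mem_cons_of_mem _ hy), by simpa using hyne⟩
      · rintro ⟨hy, hne⟩
        have hne' : y ≠ ch := by simpa using hne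
        rcases List.mem_cons.mp ((hmem y).mpr hy) with he | hd
        · exact absurd he hne'
        · exact hd
    have hsum : d'.map (fun c => min ((m.count c : Nat) : Int) ((k.count c : Nat) : Int))
        = d'.map (fun c => min (((m.filter (fun c => decide (c ≠ ch))).count c : Nat) : Int)
                              (((k.filter (fun c => decide (c ≠ ch))).count c : Nat) : Int)) := by
      apply List.map_congr_left
      intro y hy
      have hyne : y ≠ ch := fun he => hch (he ▸ hy)
      rw [pv_count_filter_ne m ch y hyne, pv_count_filter_ne k ch y hyne]
    rw [List.map_cons, List.sum_cons, hsum,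
        ih _ _ (List.nodup_cons.mp hnd).2 hmem', hcard]
    push_cast
    ring

-- ===== VERDICT (by name: the statement is the Claim_ definition above) =====
theorem number_other_spec : Claim_equal_number_other := by
  intro keyword message _ hpre
  unfold Spec_number_other number_other number_other_alt
  have h : keyword.toList.length = message.toList.length := hpre
  rw [pvUpdatedStr_eq message.toList keyword.toList h.symm,
      pvUpdatedStr_eq keyword.toList message.toList h,
      pvCountMismatch_eq message.toList keyword.toList h.symm,
      pvCountMismatch_eq keyword.toList message.toList h]
  rw [pv_loopA _ _ _ _ (fun y hy => hy)]
  simp only [PySem.Dict.items_counter, List.map_map, Function.comp_def,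
             PySem.Dict.getD_counter]
  rw [pv_sum_min (PySem.Set.ofList _) _ _ (PySem.Set.nodup_ofList _)
       (fun y => PySem.Set.mem_ofList _ y)]
  ring
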